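-- pv_equiv track=rewrite | github.com/mi1su/domain_list | src/domain_cleaner.py | analyze_domains
-- ===== SOURCE A (Python) =====
-- from typing import Set, List, Dict
--
-- def normalize_domain(domain: str) -> str:
--     """Нормализует домен: нижний регистр и без www."""
--     return domain.lower().removeprefix('www.')
--
-- def is_subdomain(domain1: str, domain2: str) -> bool:
--     """Проверяет, является ли domain1 поддоменом domain2."""
--     domain1, domain2 = normalize_domain(domain1), normalize_domain(domain2)
--     return domain1 == domain2 or domain1.endswith('.' + domain2)
--
-- def analyze_domains(lines: List[str]) -> Set[str]:
--     """Анализирует домены и возвращает список доменов для удаления."""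
--     # Сначала собираем все нормализованные домены (без категорий и пустых строк)
--     domains = {}  # domain -> original_line
--     for line in lines:
--         stripped = line.strip()
--         if stripped and not stripped.startswith('#'):
--             normalized = normalize_domain(stripped)
--             domains[normalized] = stripped
--
--     # Находим все домены, которые нужно удалить (поддомены и дубликаты)
--     domains_to_remove = set()
--     normalized_domains = list(domains.keys())
--
--     for domain1 in normalized_domains:
--         for domain2 in normalized_domains:
--             if domain1 != domain2 and is_subdomain(domain1, domain2):
--                 domains_to_remove.add(domain1)
--
--     return domains_to_remove
-- ===== SOURCE B (Python) =====
-- from typing import Set, List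
--
-- def normalize_domain(domain: str) -> str:
--     return domain.lower().removeprefix('www.')
--
-- def analyze_domains(lines: List[str]) -> Set[str]:
--     domains = {}
--     for line in lines:
--         stripped = line.strip()
--         if stripped and not stripped.startswith('#'):
--             normalized = normalize_domain(stripped)
--             domains[normalized] = stripped
--
--     keys = list(domains.keys())
--     norms = [normalize_domain(d) for d in keys]
--     cnt = {}
--     for m in norms:
--         cnt[m] = cnt.get(m, 0) + 1
--     present = set(norms)
--
--     removed = set()
--     for d, m in zip(keys, norms):
--         if cnt[m] > 1:
--             removed.add(d)
--             continue
--         for i, ch in enumerate(m):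
--             if ch == '.' and m[i + 1:] in present:
--                 removed.add(d)
--                 break
--     return removed
-- ===== Notes on version B (the rewrite author's own statement) =====
-- stated objective: faster
-- what changed: A compares every pair of collected domains with endswith; B indexes the normalized domains once (a count map for duplicates and a set membership probe on each domain's dot-suffixes), so the inner scan over all domains disappears.
import Mathlib
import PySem

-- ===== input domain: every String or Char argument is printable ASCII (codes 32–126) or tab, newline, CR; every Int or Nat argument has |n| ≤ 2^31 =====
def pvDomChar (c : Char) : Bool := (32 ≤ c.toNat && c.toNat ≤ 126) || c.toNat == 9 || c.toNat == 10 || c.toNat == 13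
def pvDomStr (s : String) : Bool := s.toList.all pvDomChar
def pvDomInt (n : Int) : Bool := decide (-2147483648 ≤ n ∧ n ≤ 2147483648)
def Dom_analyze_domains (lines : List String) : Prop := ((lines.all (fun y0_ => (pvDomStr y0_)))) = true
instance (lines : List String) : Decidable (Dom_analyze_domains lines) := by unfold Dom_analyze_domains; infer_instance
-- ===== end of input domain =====

-- B replaces A's all-pairs subdomain scan by a count map plus a set of normalized domains,
-- probing each domain's dot-suffixes; objective: faster. Both share normalize and the dict loop.

-- ===== PORT A =====
-- normalize_domain: domain.lower().removeprefix('www.')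
-- (removeprefix ported by hand, exact: drop the 4 prefix chars iff the string starts with "www.")
def pvNormalize (s : String) : String :=
  let l := PySem.Str.lower s
  if PySem.Str.startswith l "www." then String.ofList (l.toList.drop 4) else l

-- the dict-building loop shared by A and B: domains[normalize(stripped)] = stripped
def pvBuild (lines : List String) : PySem.Dict String String :=
  lines.foldl
    (fun d line =>
      let stripped := PySem.Str.strip line
      if stripped != "" && !(PySem.Str.startswith stripped "#") then
        d.insert (pvNormalize stripped) stripped
      else d)
    PySem.Dict.empty

-- is_subdomain
def pvIsSub (d1 d2 : String) : Bool :=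
  let a := pvNormalize d1
  let b := pvNormalize d2
  a == b || PySem.Str.endswith a ("." ++ b)

def analyze_domains (lines : List String) : List String :=
  let domains := pvBuild lines
  let normalized_domains := domains.keys
  normalized_domains.foldl
    (fun s d1 =>
      normalized_domains.foldl
        (fun s d2 => if d1 != d2 && pvIsSub d1 d2 then PySem.Set.add s d1 else s)
        s)
    PySem.Set.empty

-- ===== PORT B =====
-- the suffixes of cs that start right after a '.' (B's "ch == '.' and m[i+1:]" scan)
def pvDotSuffixes : List Char → List (List Char)
  | [] => []
  | c :: rest => (if c = '.' then [rest] else []) ++ pvDotSuffixes rest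

def analyze_domains_alt (lines : List String) : List String :=
  let domains := pvBuild lines
  let keys := domains.keys
  let norms := keys.map pvNormalize
  let cnt : PySem.Dict String Int :=
    norms.foldl (fun d m => d.modify m 0 (· + 1)) PySem.Dict.empty
  let present : PySem.Set String := PySem.Set.ofList norms
  (keys.zip norms).foldl
    (fun s p =>
      if 1 < cnt.getD p.2 0 then PySem.Set.add s p.1
      else if (pvDotSuffixes p.2.toList).any (fun suf => present.contains (String.ofList suf)) then
        PySem.Set.add s p.1
      else s)
    PySem.Set.empty

-- ===== PRECONDITION & SPEC =====
def Spec_analyze_domains (lines : List String) (out : List String) : Prop := out = analyze_domains_alt lines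
instance (lines : List String) (out : List String) : Decidable (Spec_analyze_domains lines out) := by unfold Spec_analyze_domains; infer_instance

-- ===== CLAIM (what is proved, stated in full; the proofs are below) =====
def Claim_equal_analyze_domains : Prop := ∀ (lines : List String), Dom_analyze_domains lines → Spec_analyze_domains lines (analyze_domains lines)

-- ===== LEMMAS AND PROOFS =====

theorem pv_add_idem (s : PySem.Set String) (a : String) :
    PySem.Set.add (PySem.Set.add s a) a = PySem.Set.add s a := by
  by_cases h : a ∈ s <;>
    simp [PySem.Set.add, PySem.Set.contains, h]

-- A's inner loop: it only ever adds the one element a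
theorem pv_foldl_add_if {β : Type} (p : β → Bool) (a : String) :
    ∀ (l : List β) (s : PySem.Set String),
      List.foldl (fun s x => if p x then PySem.Set.add s a else s) s l =
        if l.any p then PySem.Set.add s a else s := by
  intro l
  induction l with
  | nil => intro s; simp
  | cons x t ih =>
    intro s
    by_cases hp : p x = true
    · simp only [List.foldl_cons, List.any_cons, hp, if_pos, Bool.true_or]
      rw [ih]
      split
      · rw [pv_add_idem]
      · rfl
    · simp [hp, ih]

theorem pv_mem_pvDotSuffixes (cs suf : List Char) :
    suf ∈ pvDotSuffixes cs ↔ ('.' :: suf) <:+ cs := by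
  induction cs with
  | nil => simp [pvDotSuffixes]
  | cons c rest ih =>
    simp only [pvDotSuffixes, List.mem_append, ih, List.suffix_cons_iff, List.cons.injEq]
    by_cases hc : c = '.' <;> simp [hc] <;> tauto

theorem pv_nodup_keys_pvBuild (lines : List String) : (pvBuild lines).keys.Nodup := by
  unfold pvBuild
  have h : ∀ (l : List String) (d : PySem.Dict String String), d.keys.Nodup →
      (l.foldl (fun d line =>
        let stripped := PySem.Str.strip line
        if stripped != "" && !(PySem.Str.startswith stripped "#") then
          d.insert (pvNormalize stripped) stripped
        else d) d).keys.Nodup := by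
    intro l
    induction l with
    | nil => intro d hd; simpa using hd
    | cons x t ih =>
      intro d hd
      simp only [List.foldl_cons]
      split
      · exact ih _ (PySem.Dict.nodup_keys_insert _ _ _ hd)
      · exact ih _ hd
  exact h lines PySem.Dict.empty (by simp [PySem.Dict.empty])

-- duplicates under f, on a Nodup list, are exactly "count > 1"
theorem pv_count_gt_one_iff {α β : Type} [BEq β] [LawfulBEq β] (f : α → β) :
    ∀ (keys : List α), keys.Nodup → ∀ d ∈ keys,
      (1 < (keys.map f).count (f d) ↔ ∃ e ∈ keys, e ≠ d ∧ f e = f d) := by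
  intro keys
  induction keys with
  | nil => intro _ d hd; simp at hd
  | cons k rest ih =>
    intro hnd d hd
    have hk : k ∉ rest := (List.nodup_cons.mp hnd).1
    have hr : rest.Nodup := (List.nodup_cons.mp hnd).2
    by_cases hdk : d = k
    · subst hdk
      have hdnr : d ∉ rest := hk
      constructor
      · intro h
        have hpos : 0 < (rest.map f).count (f d) := by
          simp only [List.map_cons, List.count_cons_self] at h
          omega
        rcases List.mem_map.mp (List.count_pos_iff.mp hpos) with ⟨e, he, hfe⟩
        exact ⟨e, List.mem_cons_of_mem _ he, fun hed => hdnr (hed ▸ he), hfe⟩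
      · rintro ⟨e, he, hne, hfe⟩
        have he' : e ∈ rest := by
          rcases List.mem_cons.mp he with h | h
          · exact absurd h hne
          · exact h
        have hpos : 0 < (rest.map f).count (f d) :=
          List.count_pos_iff.mpr (List.mem_map.mpr ⟨e, he', hfe⟩)
        simp only [List.map_cons, List.count_cons_self]
        omega
    · have hdr : d ∈ rest := by
        rcases List.mem_cons.mp hd with h | h
        · exact absurd h hdk
        · exact h
      by_cases hf : f k = f d
      · constructor
        · intro _; exact ⟨k, List.mem_cons_self .., fun h => hdk h.symm, hf⟩
        · intro _
          have hpos : 0 < (rest.map f).count (f d) :=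
            List.count_pos_iff.mpr (List.mem_map.mpr ⟨d, hdr, rfl⟩)
          rw [List.map_cons, hf, List.count_cons_self]
          omega
      · have hrw : ((k :: rest).map f).count (f d) = (rest.map f).count (f d) := by
          rw [List.map_cons, List.count_cons_of_ne hf]
        rw [hrw, ih hr d hdr]
        constructor
        · rintro ⟨e, he, hne, hfe⟩
          exact ⟨e, List.mem_cons_of_mem _ he, hne, hfe⟩
        · rintro ⟨e, he, hne, hfe⟩
          rcases List.mem_cons.mp he with h | h
          · exact absurd (h ▸ hfe) hf
          · exact ⟨e, h, hne, hfe⟩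

theorem pv_foldl_zip_map {α β γ : Type} (f : α → β) (g : γ → α × β → γ) :
    ∀ (keys : List α) (s : γ),
      (keys.zip (keys.map f)).foldl g s = keys.foldl (fun s d => g s (d, f d)) s := by
  intro keys
  induction keys with
  | nil => intro s; rfl
  | cons k t ih => intro s; simp [ih]

-- the pointwise condition equivalence, for d a key
set_option maxHeartbeats 1000000 in
theorem pv_main_iff (keys : List String) (hnd : keys.Nodup) (d : String) (hd : d ∈ keys) :
    (keys.any (fun d2 => d != d2 && pvIsSub d d2) = true) ↔
      (1 < (keys.map pvNormalize).count (pvNormalize d) ∨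
        ((pvDotSuffixes (pvNormalize d).toList).any
          (fun suf => (PySem.Set.ofList (keys.map pvNormalize)).contains (String.ofList suf)) = true)) := by
  rw [List.any_eq_true]
  have hends : ∀ d2 : String,
      (pvIsSub d d2 = true) ↔
        (pvNormalize d = pvNormalize d2 ∨
          ('.' :: (pvNormalize d2).toList) <:+ (pvNormalize d).toList) := by
    intro d2
    simp [pvIsSub, PySem.Chars.endswith_iff]
  have hsuf : ((pvDotSuffixes (pvNormalize d).toList).any
      (fun suf => (PySem.Set.ofList (keys.map pvNormalize)).contains (String.ofList suf)) = true) ↔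
      (∃ d2 ∈ keys, ('.' :: (pvNormalize d2).toList) <:+ (pvNormalize d).toList) := by
    rw [List.any_eq_true]
    constructor
    · rintro ⟨suf, hmem, hcont⟩
      have hin : String.ofList suf ∈ keys.map pvNormalize := by
        rw [PySem.Set.contains_iff] at hcont
        exact (PySem.Set.mem_ofList _ _).mp hcont
      rcases List.mem_map.mp hin with ⟨d2, hd2, hfd2⟩
      refine ⟨d2, hd2, (pv_mem_pvDotSuffixes _ _).mp ?_⟩
      have hts : (pvNormalize d2).toList = suf := by rw [hfd2]; simp
      rw [hts]; exact hmem
    · rintro ⟨d2, hd2, hs⟩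
      refine ⟨(pvNormalize d2).toList, (pv_mem_pvDotSuffixes _ _).mpr hs, ?_⟩
      rw [PySem.Set.contains_iff, PySem.Set.mem_ofList]
      simpa using List.mem_map.mpr ⟨d2, hd2, rfl⟩
  rw [hsuf, pv_count_gt_one_iff pvNormalize keys hnd d hd]
  constructor
  · rintro ⟨d2, hd2, hcond⟩
    rw [Bool.and_eq_true, bne_iff_ne] at hcond
    rcases hcond with ⟨hne, hsub⟩
    rcases (hends d2).mp hsub with h | h
    · exact Or.inl ⟨d2, hd2, fun he => hne he.symm, h.symm⟩
    · exact Or.inr ⟨d2, hd2, h⟩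
  · rintro (⟨e, he, hne, hfe⟩ | ⟨d2, hd2, hs⟩)
    · refine ⟨e, he, ?_⟩
      rw [Bool.and_eq_true, bne_iff_ne]
      exact ⟨fun h => hne h.symm, (hends e).mpr (Or.inl hfe.symm)⟩
    · have hne : d ≠ d2 := by
        rintro rfl
        have := hs.length_le
        simp at this
      refine ⟨d2, hd2, ?_⟩
      rw [Bool.and_eq_true, bne_iff_ne]
      exact ⟨hne, (hends d2).mpr (Or.inr hs)⟩

set_option maxHeartbeats 1000000 in
theorem analyze_domains_spec : Claim_equal_analyze_domains := by
  intro lines _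
  show analyze_domains lines = analyze_domains_alt lines
  simp only [analyze_domains, analyze_domains_alt]
  rw [pv_foldl_zip_map]
  have hnd := pv_nodup_keys_pvBuild lines
  set keys := (pvBuild lines).keys with hkeys
  -- rewrite B's hand-rolled count loop into Counter, then into List.count
  simp only [← PySem.Dict.counter_eq_foldl, PySem.Dict.getD_counter]
  apply PySem.List.foldl_congr_mem
  intro s d hd
  rw [pv_foldl_add_if]
  by_cases hA : keys.any (fun d2 => d != d2 && pvIsSub d d2) = true
  · rcases (pv_main_iff keys hnd d hd).mp hA with h | h
    · have hcast : (1 : Int) < ((keys.map pvNormalize).count (pvNormalize d) : Int) := by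
        exact_mod_cast h
      rw [if_pos hA, if_pos hcast]
    · by_cases hc : (1 : Int) < ((keys.map pvNormalize).count (pvNormalize d) : Int)
      · rw [if_pos hA, if_pos hc]
      · rw [if_pos hA, if_neg hc, if_pos h]
  · have h := (pv_main_iff keys hnd d hd)
    have hnc : ¬ (1 < (keys.map pvNormalize).count (pvNormalize d)) := by
      intro hc; exact hA (h.mpr (Or.inl hc))
    have hns : ¬ ((pvDotSuffixes (pvNormalize d).toList).any
        (fun suf => (PySem.Set.ofList (keys.map pvNormalize)).contains (String.ofList suf)) = true) := by
      intro hc; exact hA (h.mpr (Or.inr hc))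
    have hnc' : ¬ ((1 : Int) < ((keys.map pvNormalize).count (pvNormalize d) : Int)) := by
      exact_mod_cast hnc
    rw [if_neg hA, if_neg hnc', if_neg hns]
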